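-- pv_equiv track=rewrite | github.com/wilfordwoodruff/DSS_S23_Scripture | code/StringUtil.py | split_string_into_list
-- ===== SOURCE A (Python) =====
-- def split_string_into_list(string, n, increment = 0):
--     """ Basically converts a string of text into a list of strings of text
--     each element containing n words.
--     Except the last few words get attatched on the end of the last element of the list,
--     # but only if the number of remaining words is > n/2 or more than half of n
--     """
--     words = string.split()
--     result = []
--     for i in range(0, len(words), n):
--         if i + n < len(words) or len(result) == 0:
--             phrase = ' '.join(words[i : i + n])
--             result.append(phrase)
--         else:
--             phrase = ' '.join(words[i : i + n])
--             result[-1] += ' ' + phrase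
--     return result
-- ===== SOURCE B (Python) =====
-- def split_string_into_list(string, n, increment = 0):
--     if n <= 0:
--         raise ValueError("chunk size must be positive")
--     def rec(words):
--         # once at most 2*n words remain they form one final element
--         if len(words) <= 2 * n:
--             return [' '.join(words)] if words else []
--         return [' '.join(words[:n])] + rec(words[n:])
--     return rec(string.split())
-- ===== Notes on version B (the rewrite author's own statement) =====
-- stated objective: simpler
-- what changed: A iterates over all chunk start indices and decides append-vs-merge-into-last inside the loop; B is a greedy recursion over the word list with a lookahead threshold: it peels off n words while more than 2*n words remain, otherwise joins everything left into one final element, so the merge step disappears entirely.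
-- outside the precondition, e.g. on split_string_into_list('a b c', -2, 0): A returns [], B raises ValueError
import Mathlib
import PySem

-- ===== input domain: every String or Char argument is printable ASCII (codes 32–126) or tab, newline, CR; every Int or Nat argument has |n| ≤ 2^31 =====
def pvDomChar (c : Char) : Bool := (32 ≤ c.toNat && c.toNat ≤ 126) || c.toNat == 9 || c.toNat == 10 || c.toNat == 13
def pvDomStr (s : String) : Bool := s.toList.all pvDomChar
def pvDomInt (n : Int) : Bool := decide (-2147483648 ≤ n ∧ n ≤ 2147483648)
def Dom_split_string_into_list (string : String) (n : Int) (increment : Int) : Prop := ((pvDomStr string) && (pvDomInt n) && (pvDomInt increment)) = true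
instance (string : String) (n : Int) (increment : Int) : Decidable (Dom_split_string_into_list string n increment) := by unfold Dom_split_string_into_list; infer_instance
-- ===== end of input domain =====

-- B replaces A's chunk-index loop with its append-vs-merge-into-last conditional by a greedy
-- recursion over the word list: peel off n words while more than 2*n words remain, otherwise
-- join everything left into one final element (objective: simpler — the merge step disappears).

-- ===== PORT A =====
-- result[-1] += s : append s to the last element (Python only reaches this with result nonempty)
def pvAddLast : List String → String → List String
  | [], _ => []
  | [x], s => [x ++ s]
  | x :: y :: t, s => x :: pvAddLast (y :: t) s

def split_string_into_list (string : String) (n : Int) (increment : Int) : List String :=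
  let words := PySem.Str.split₀ string
  (PySem.List.pyRange 0 (words.length : Int) n).foldl
    (fun result i =>
      if i + n < (words.length : Int) ∨ result.length = 0 then
        result ++ [PySem.Str.join " " (PySem.List.slice words (some i) (some (i + n)))]
      else
        pvAddLast result (" " ++ PySem.Str.join " " (PySem.List.slice words (some i) (some (i + n)))))
    []

-- ===== PORT B =====
-- rec(words) of Source B; N is the (positive) chunk size. The 'N = 0' disjunct is a totality guard
-- only (callers pass N ≥ 1, Source B has raised for n ≤ 0 before rec is ever called);
-- words[:n] / words[n:] for 0 ≤ n are List.take / List.drop (PySem.List.slice_to_natCast /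
-- slice_from_natCast), used here directly.
def pvRec (N : Nat) (ws : List String) : List String :=
  if h : ws.length ≤ 2 * N ∨ N = 0 then
    if ws = [] then [] else [PySem.Str.join " " ws]
  else
    PySem.Str.join " " (ws.take N) :: pvRec N (ws.drop N)
termination_by ws.length
decreasing_by
  push_neg at h
  simp only [List.length_drop]
  omega

def split_string_into_list_alt (string : String) (n : Int) (increment : Int) : List String :=
  if n ≤ 0 then []   -- Source B raises ValueError here; outside Pre_
  else pvRec n.toNat (PySem.Str.split₀ string)

-- ===== PRECONDITION & SPEC =====
-- Pre_ excludes n = 0, where A's range(0, len(words), 0) raises ValueError, and n < 0, where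
-- A returns [] only as an artefact of range's empty negative-step sequence while B (which
-- requires a positive chunk size) raises ValueError.
def Pre_split_string_into_list (string : String) (n : Int) (increment : Int) : Prop := 0 < n
instance (string : String) (n : Int) (increment : Int) : Decidable (Pre_split_string_into_list string n increment) := by unfold Pre_split_string_into_list; infer_instance

def pvWitness_split_string_into_list : String × Int × Int := ("a b c", 2, 0)

def Spec_split_string_into_list (string : String) (n : Int) (increment : Int) (out : List String) : Prop := out = split_string_into_list_alt string n increment
instance (string : String) (n : Int) (increment : Int) (out : List String) : Decidable (Spec_split_string_into_list string n increment out) := by unfold Spec_split_string_into_list; infer_instance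

-- ===== CLAIM (what is proved, stated in full; the proofs are below) =====
def Claim_equal_split_string_into_list : Prop := ∀ (string : String) (n : Int) (increment : Int), Dom_split_string_into_list string n increment → Pre_split_string_into_list string n increment → Spec_split_string_into_list string n increment (split_string_into_list string n increment)

-- ===== LEMMAS AND PROOFS =====

-- chunks[-2] += s : append s to the second-to-last element (proof-side helper: together with
-- pvE below it names the chunk-list-then-merge shape that A's loop is first shown to equal)
def pvAddPenult : List String → String → List String
  | [], _ => []
  | [x], _ => [x]
  | [x, y], s => [x ++ s, y]
  | x :: y :: z :: t, s => x :: pvAddPenult (y :: z :: t) s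

-- intermediate shape: the full chunk list, then one merge of the last two chunks
def pvE (ws : List String) (n : Int) : List String :=
  let chunks := (PySem.List.pyRange 0 (ws.length : Int) n).map
    (fun i => PySem.Str.join " " (PySem.List.slice ws (some i) (some (i + n))))
  if chunks.length > 1 then
    (pvAddPenult chunks (" " ++ chunks.getLastD "")).dropLast
  else chunks

-- A's loop appends f j for every index j with j + n < L, whatever the accumulator
lemma pvFoldA_app (L n : Int) (f : Int → String) :
    ∀ (js : List Int) (res : List String), (∀ j ∈ js, j + n < L) →
    js.foldl (fun result i =>
      if i + n < L ∨ result.length = 0 then result ++ [f i]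
      else pvAddLast result (" " ++ f i)) res = res ++ js.map f := by
  intro js
  induction js with
  | nil => intro res _; simp
  | cons j js ih =>
    intro res h
    have hj : j + n < L := h j (by simp)
    simp only [List.foldl_cons, if_pos (Or.inl hj)]
    rw [ih (res ++ [f j]) (fun x hx => h x (by simp [hx]))]
    simp

lemma pvLen_addPenult : ∀ (l : List String) (s : String), (pvAddPenult l s).length = l.length
  | [], _ => by simp [pvAddPenult]
  | [_], _ => by simp [pvAddPenult]
  | [_, _], _ => by simp [pvAddPenult]
  | x :: y :: z :: t, s => by
      simpa [pvAddPenult] using pvLen_addPenult (y :: z :: t) s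

-- the chunks-then-merge fix-up on ys ++ [z] is exactly A's merge into the last element of ys
lemma pvPenult_dropLast (ys : List String) (z s : String) (hys : ys ≠ []) :
    (pvAddPenult (ys ++ [z]) s).dropLast = pvAddLast ys s := by
  induction ys with
  | nil => exact absurd rfl hys
  | cons y ys ih =>
    cases ys with
    | nil => simp [pvAddPenult, pvAddLast]
    | cons a t =>
      specialize ih (by simp)
      have hne : pvAddPenult (a :: (t ++ [z])) s ≠ [] := by
        intro h
        have := pvLen_addPenult (a :: (t ++ [z])) s
        rw [h] at this
        simp at this
      simp only [List.cons_append] at ih ⊢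
      cases ht : t ++ [z] with
      | nil => simp at ht
      | cons c t' =>
        rw [ht] at ih hne
        show (y :: pvAddPenult (a :: c :: t') s).dropLast = y :: pvAddLast (a :: t) s
        rw [List.dropLast_cons_of_ne_nil hne, ih]

-- A's fold equals the chunks-then-merge shape (for a positive step)
lemma pvMain (ws : List String) (n : Int) (hn : 0 < n) :
    (PySem.List.pyRange 0 (ws.length : Int) n).foldl
      (fun result i =>
        if i + n < (ws.length : Int) ∨ result.length = 0 then
          result ++ [PySem.Str.join " " (PySem.List.slice ws (some i) (some (i + n)))]
        else
          pvAddLast result (" " ++ PySem.Str.join " " (PySem.List.slice ws (some i) (some (i + n)))))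
      [] = pvE ws n := by
  simp only [pvE]
  set L : Int := (ws.length : Int) with hLdef
  set f : Int → String := fun i => PySem.Str.join " " (PySem.List.slice ws (some i) (some (i + n))) with hf
  rw [PySem.List.pyRange_of_pos 0 L hn]
  by_cases hL : 0 < L
  · rw [if_pos hL]
    set q : Int := (L - 0 + n - 1) / n with hq
    have hdm := Int.ediv_add_emod (L - 0 + n - 1) n
    have hr0 : 0 ≤ (L - 0 + n - 1) % n := Int.emod_nonneg _ (by omega)
    have hrn : (L - 0 + n - 1) % n < n := Int.emod_lt_of_pos _ hn
    rw [← hq] at hdm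
    have hMge : L ≤ n * q := by omega
    have hMlt : n * (q - 1) < L := by rw [mul_sub, mul_one]; omega
    have hqpos : 0 < q := by
      by_contra h
      have : n * q ≤ 0 := mul_nonpos_of_nonneg_of_nonpos (le_of_lt hn) (by omega)
      omega
    obtain ⟨m, hm⟩ : ∃ m, q.toNat = m + 1 := ⟨q.toNat - 1, by omega⟩
    have hmcast : (m : Int) = q - 1 := by omega
    rw [hm, List.range_succ]
    simp only [List.map_append, List.map_cons, List.map_nil]
    have hjs : ∀ j ∈ List.map (fun k : Nat => 0 + n * (k : Int)) (List.range m), j + n < L := by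
      intro j hj
      simp only [List.mem_map, List.mem_range] at hj
      obtain ⟨k, hk, rfl⟩ := hj
      have hk1 : ((k : Int) + 1) ≤ (m : Int) := by exact_mod_cast hk
      have h2 : n * ((k : Int) + 1) ≤ n * (m : Int) :=
        mul_le_mul_of_nonneg_left hk1 (le_of_lt hn)
      rw [hmcast] at h2
      have he : 0 + n * (k : Int) + n = n * ((k : Int) + 1) := by ring
      omega
    have hk_last : ¬ (0 + n * (m : Int) + n < L) := by
      rw [hmcast]
      have he : 0 + n * (q - 1) + n = n * q := by ring
      omega
    rw [List.foldl_append, pvFoldA_app L n f _ [] hjs]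
    simp only [List.foldl_cons, List.foldl_nil, List.nil_append]
    cases m with
    | zero => simp [hf]
    | succ m' =>
      have hne : (List.map (fun k : Nat => 0 + n * (k : Int)) (List.range (m' + 1))).map f ≠ [] := by
        simp [List.range_succ]
      rw [if_neg (by
        refine not_or.mpr ⟨hk_last, ?_⟩
        simpa using hne)]
      rw [if_pos (by simp [List.range_succ]), List.getLastD_concat,
        pvPenult_dropLast _ _ _ hne]
  · rw [if_neg hL]
    simp

-- ' '.join over a split list (Chars level): join distributes over ++ with a separator between
lemma pvJoinChars_append (sep : List Char) :
    ∀ (xs ys : List (List Char)), xs ≠ [] → ys ≠ [] →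
    PySem.Chars.join sep (xs ++ ys) = PySem.Chars.join sep xs ++ sep ++ PySem.Chars.join sep ys := by
  intro xs
  induction xs with
  | nil => intro ys h _; exact absurd rfl h
  | cons x xs ih =>
    intro ys _ hy
    obtain ⟨y, t, rfl⟩ : ∃ y t, ys = y :: t := by
      cases ys with
      | nil => exact absurd rfl hy
      | cons y t => exact ⟨y, t, rfl⟩
    cases xs with
    | nil => simpa using PySem.Chars.join_cons_cons sep x y t
    | cons x' xs' =>
      have h2 := ih (y :: t) (by simp) hy
      simp only [List.cons_append] at h2 ⊢
      rw [PySem.Chars.join_cons_cons sep x x' (xs' ++ y :: t), h2,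
        PySem.Chars.join_cons_cons sep x x' xs']
      simp [List.append_assoc]

-- same at the String level
lemma pvJoin_append (xs ys : List String) (hx : xs ≠ []) (hy : ys ≠ []) :
    PySem.Str.join " " (xs ++ ys) = PySem.Str.join " " xs ++ " " ++ PySem.Str.join " " ys := by
  apply String.toList_inj.mp
  simp only [String.toList_append, PySem.Str.toList_join, List.map_append]
  have := pvJoinChars_append " ".toList (xs.map String.toList) (ys.map String.toList)
    (by simpa using hx) (by simpa using hy)
  simpa using this

-- default-irrelevance of getLastD on a nonempty list
lemma pvGetLastD_irrel (t : List String) (y d d' : String) :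
    (y :: t).getLastD d = (y :: t).getLastD d' := by
  cases t with
  | nil => rfl
  | cons z t => simp only [List.getLastD_cons]

-- unfolding lemmas for pvRec
lemma pvRec_base (N : Nat) (ws : List String) (h : ws.length ≤ 2 * N) :
    pvRec N ws = if ws = [] then [] else [PySem.Str.join " " ws] := by
  rw [pvRec, dif_pos (Or.inl h)]

lemma pvRec_step (N : Nat) (ws : List String) (h1 : 2 * N < ws.length) (h2 : N ≠ 0) :
    pvRec N ws = PySem.Str.join " " (ws.take N) :: pvRec N (ws.drop N) := by
  rw [pvRec, dif_neg (by omega)]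

-- ws[0 : n] for 0 < n is take n.toNat
lemma pvSlice_head (ws : List String) (n : Int) (hn : 0 < n) :
    PySem.List.slice ws (some (0 + n * ((0 : Nat) : Int)))
      (some (0 + n * ((0 : Nat) : Int) + n)) = ws.take n.toNat := by
  have e1 : (0 + n * ((0 : Nat) : Int)) = (0 : Int) := by simp
  have e2 : (0 + n * ((0 : Nat) : Int) + n) = n := by simp
  rw [e2, e1, PySem.List.slice_zero_start, PySem.List.slice_to ws (le_of_lt hn)]

-- the k+1-st chunk of ws is the k-th chunk of ws with the first n words dropped
lemma pvSlice_shift (ws : List String) (n : Int) (hn : 0 < n) (k : Nat) :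
    PySem.List.slice ws (some (0 + n * ((Nat.succ k : Nat) : Int)))
      (some (0 + n * ((Nat.succ k : Nat) : Int) + n)) =
    PySem.List.slice (ws.drop n.toNat) (some (0 + n * (k : Int)))
      (some (0 + n * (k : Int) + n)) := by
  set N := n.toNat with hNdef
  have hNc : (N : Int) = n := by omega
  have e1 : (0 + n * ((Nat.succ k : Nat) : Int)) = ((N * (k + 1) : Nat) : Int) := by
    push_cast [← hNc]; ring
  have e2 : (0 + n * ((Nat.succ k : Nat) : Int) + n) = ((N * (k + 1) : Nat) : Int) + ((N : Nat) : Int) := by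
    push_cast [← hNc]; ring
  have e3 : (0 + n * ((k : Nat) : Int)) = ((N * k : Nat) : Int) := by
    push_cast [← hNc]; ring
  have e4 : (0 + n * ((k : Nat) : Int) + n) = ((N * k : Nat) : Int) + ((N : Nat) : Int) := by
    push_cast [← hNc]; ring
  rw [e2, e1, e4, e3, PySem.List.slice_natCast_add, PySem.List.slice_natCast_add,
    List.drop_drop]
  congr 1
  ring

-- the chunks-then-merge shape equals B's greedy recursion (positive chunk size)
lemma pvE_eq_pvRec : ∀ (m : Nat) (ws : List String), ws.length = m →
    ∀ n : Int, 0 < n → pvE ws n = pvRec n.toNat ws := by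
  intro m
  induction m using Nat.strong_induction_on with
  | _ m ih =>
    intro ws hws n hn
    have hN1 : 1 ≤ n.toNat := by omega
    set N := n.toNat with hNdef
    have hNc : (N : Int) = n := by omega
    simp only [pvE]
    rw [PySem.List.pyRange_of_pos 0 (ws.length : Int) hn]
    by_cases h0 : ws = []
    · subst h0
      rw [pvRec_base N [] (by simp)]
      simp
    · have hm0 : 0 < ws.length := List.length_pos_of_ne_nil h0
      have hcond : (0 : Int) < (ws.length : Int) := by exact_mod_cast hm0
      rw [if_pos hcond]
      set L : Int := (ws.length : Int) with hL
      set q : Int := (L - 0 + n - 1) / n with hq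
      clear_value L q
      have hL0 : 0 < L := by omega
      have hqlt : ∀ b : Int, q < b ↔ L - 0 + n - 1 < b * n := by
        intro b
        rw [hq]
        exact Int.ediv_lt_iff_lt_mul hn
      have hqle : ∀ b : Int, b ≤ q ↔ b * n ≤ L - 0 + n - 1 := by
        intro b
        rw [hq]
        exact Int.le_ediv_iff_mul_le hn
      by_cases hc1 : L ≤ n
      · -- one chunk: both sides are [' '.join(words)]
        have hq1 : q.toNat = 1 := by
          have h1 := (hqle 1).mpr (by omega)
          have h2 := (hqlt 2).mpr (by omega)
          omega
        rw [hq1]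
        rw [pvRec_base N ws (by omega)]
        rw [if_neg h0]
        simp only [List.range_one, List.map_cons, List.map_nil, List.length_cons,
          List.length_nil]
        rw [if_neg (by omega)]
        rw [pvSlice_head ws n hn, ← hNdef, List.take_of_length_le (by omega)]
      · by_cases hc2 : L ≤ 2 * n
        · -- two chunks merged into one: B joins everything at once
          have hq2 : q.toNat = 2 := by
            have h1 := (hqle 2).mpr (by omega)
            have h2 := (hqlt 3).mpr (by omega)
            omega
          rw [hq2]
          rw [pvRec_base N ws (by omega), if_neg h0]
          have hr2 : List.range 2 = [0, 1] := by decide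
          rw [hr2]
          simp only [List.map_cons, List.map_nil, List.length_cons, List.length_nil]
          rw [if_pos (by omega)]
          have hcomp : ∀ a b : String,
              (pvAddPenult [a, b] (" " ++ ([a, b] : List String).getLastD "")).dropLast
                = [a ++ (" " ++ b)] := fun a b => rfl
          rw [hcomp]
          -- first chunk = take N ws, second chunk = drop N ws
          rw [pvSlice_head ws n hn, ← hNdef]
          have e1 : (0 + n * ((1 : Nat) : Int)) = ((N : Nat) : Int) := by
            push_cast [← hNc]; ring
          have e2 : (0 + n * ((1 : Nat) : Int) + n) = ((N : Nat) : Int) + ((N : Nat) : Int) := by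
            push_cast [← hNc]; ring
          rw [e2, e1, PySem.List.slice_natCast_add,
            List.take_of_length_le (show (ws.drop N).length ≤ N by rw [List.length_drop]; omega)]
          have htk : ws.take N ≠ [] := by
            have hlt : 0 < (ws.take N).length := by rw [List.length_take]; omega
            intro h
            rw [h] at hlt
            simp at hlt
          have hdr : ws.drop N ≠ [] := by
            have hlt : 0 < (ws.drop N).length := by rw [List.length_drop]; omega
            intro h
            rw [h] at hlt
            simp at hlt
          have hj := pvJoin_append (ws.take N) (ws.drop N) htk hdr
          rw [List.take_append_drop] at hj
          rw [hj]
          simp [String.append_assoc]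
        · -- more than two chunks: peel off the first chunk and recurse
          have hq3 : 3 ≤ q := (hqle 3).mpr (by omega)
          obtain ⟨K', hK'⟩ : ∃ K', q.toNat = K' + 1 := ⟨q.toNat - 1, by omega⟩
          have hK'c : (K' : Int) = q - 1 := by omega
          have hK'2 : 2 ≤ K' := by omega
          rw [hK', List.range_succ_eq_map]
          simp only [List.map_cons, List.map_map]
          rw [pvSlice_head ws n hn, ← hNdef]
          -- the tail chunks are the chunks of ws.drop N
          have htail :
              (List.map ((fun i => PySem.Str.join " " (PySem.List.slice ws (some i) (some (i + n)))) ∘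
                  ((fun k : Nat => 0 + n * ((k : Nat) : Int)) ∘ Nat.succ)) (List.range K')) =
              List.map (fun i => PySem.Str.join " " (PySem.List.slice (ws.drop N) (some i) (some (i + n))))
                (List.map (fun k : Nat => 0 + n * ((k : Nat) : Int)) (List.range K')) := by
            rw [List.map_map]
            apply List.map_congr_left
            intro k _
            simp only [Function.comp]
            rw [pvSlice_shift ws n hn k, ← hNdef]
          rw [htail]
          set tailChunks : List String :=
            List.map (fun i => PySem.Str.join " " (PySem.List.slice (ws.drop N) (some i) (some (i + n))))
              (List.map (fun k : Nat => 0 + n * ((k : Nat) : Int)) (List.range K')) with htc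
          have hlen : tailChunks.length = K' := by simp [htc]
          obtain ⟨y, t1, hy⟩ : ∃ y t1, tailChunks = y :: t1 := by
            cases hx : tailChunks with
            | nil => rw [hx] at hlen; simp at hlen; omega
            | cons y t1 => exact ⟨y, t1, rfl⟩
          obtain ⟨z, t2, hz⟩ : ∃ z t2, t1 = z :: t2 := by
            cases hx : t1 with
            | nil => rw [hy, hx] at hlen; simp at hlen; omega
            | cons z t2 => exact ⟨z, t2, rfl⟩
          rw [hy, hz]
          rw [if_pos (by simp)]
          set c0 := PySem.Str.join " " (ws.take N) with hc0
          have hpa : pvAddPenult (c0 :: y :: z :: t2)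
              (" " ++ (c0 :: y :: z :: t2).getLastD "") =
              c0 :: pvAddPenult (y :: z :: t2) (" " ++ (y :: z :: t2).getLastD "") := by
            rw [List.getLastD_cons, pvGetLastD_irrel (z :: t2) y c0 ""]
            rfl
          rw [hpa]
          have hne : pvAddPenult (y :: z :: t2) (" " ++ (y :: z :: t2).getLastD "") ≠ [] := by
            intro h
            have := pvLen_addPenult (y :: z :: t2) (" " ++ (y :: z :: t2).getLastD "")
            rw [h] at this
            simp at this
          rw [List.dropLast_cons_of_ne_nil hne]
          -- the merged tail is pvE of ws.drop N
          have hEtail : (pvAddPenult (y :: z :: t2) (" " ++ (y :: z :: t2).getLastD "")).dropLast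
              = pvE (ws.drop N) n := by
            simp only [pvE]
            rw [PySem.List.pyRange_of_pos 0 ((ws.drop N).length : Int) hn]
            have hd0 : 0 < (ws.drop N).length := by rw [List.length_drop]; omega
            have hcond2 : (0 : Int) < ((ws.drop N).length : Int) := by exact_mod_cast hd0
            rw [if_pos hcond2]
            have hdc : ((ws.drop N).length : Int) = L - n := by
              rw [List.length_drop]
              omega
            have hqd : (((ws.drop N).length : Int) - 0 + n - 1) / n = q - 1 := by
              rw [hdc]
              have he : L - n - 0 + n - 1 = (L - 0 + n - 1) + (-1) * n := by ring
              rw [he, Int.add_mul_ediv_right _ _ (by omega : n ≠ 0), ← hq]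
              ring
            rw [hqd]
            have hqd2 : (q - 1).toNat = K' := by omega
            rw [hqd2, ← htc, hy, hz]
            rw [if_pos (by simp)]
          rw [hEtail]
          -- induction hypothesis on the N-shorter word list
          rw [ih (ws.drop N).length (by rw [List.length_drop]; omega) (ws.drop N) rfl n hn]
          rw [pvRec_step N ws (by omega) (by omega)]

-- ===== VERDICT (by name: the statement is the Claim_ definition above) =====
theorem split_string_into_list_spec : Claim_equal_split_string_into_list := by
  intro string n increment _ hpre
  have hn : 0 < n := hpre
  unfold Spec_split_string_into_list split_string_into_list split_string_into_list_alt
  rw [if_neg (by omega : ¬ n ≤ 0)]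
  rw [pvMain (PySem.Str.split₀ string) n hn]
  exact pvE_eq_pvRec _ _ rfl n hn
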